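-- pv_equiv track=rewrite | github.com/hungpthanh/CompetitiveProgramming | VNOI/icpc2024_national/A.py | precompute_combinations
-- ===== SOURCE A (Python) =====
-- def precompute_combinations(max_count):
--     """Precompute combinations for nC2 and nC3."""
--     comb2 = [0] * (max_count + 1)
--     comb3 = [0] * (max_count + 1)
--     for i in range(2, max_count + 1):
--         comb2[i] = (i * (i - 1)) // 2
--     for i in range(3, max_count + 1):
--         comb3[i] = (i * (i - 1) * (i - 2)) // 6
--     return comb2, comb3
-- ===== SOURCE B (Python) =====
-- def precompute_combinations(max_count):
--     """Precompute combinations for nC2 and nC3 by Pascal-style additive recurrences."""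
--     comb2 = []
--     comb3 = []
--     c2 = 0
--     c3 = 0
--     for i in range(0, max_count + 1):
--         comb2.append(c2)
--         comb3.append(c3)
--         c3 += c2
--         c2 += i
--     return comb2, comb3
-- ===== Notes on version B (the rewrite author's own statement) =====
-- stated objective: alternative
-- what changed: B replaces A's two index-assignment loops over preallocated zero arrays, each evaluating a closed-form falling-factorial product with integer division, by a single forward pass that appends to initially empty lists while maintaining nC2 and nC3 via Pascal-style additive recurrences (c2 += i, c3 += c2), using no multiplication or division at all.
import Mathlib
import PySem

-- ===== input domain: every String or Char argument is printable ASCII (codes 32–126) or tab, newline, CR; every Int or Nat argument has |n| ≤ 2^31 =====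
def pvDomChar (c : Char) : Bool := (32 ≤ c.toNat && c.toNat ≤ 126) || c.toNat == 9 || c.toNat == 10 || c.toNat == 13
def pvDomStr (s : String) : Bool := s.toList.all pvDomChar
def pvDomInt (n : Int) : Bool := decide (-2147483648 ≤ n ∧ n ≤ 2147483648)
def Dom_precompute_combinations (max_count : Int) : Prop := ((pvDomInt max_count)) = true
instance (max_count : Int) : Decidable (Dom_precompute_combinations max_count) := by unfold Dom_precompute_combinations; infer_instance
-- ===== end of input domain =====

-- B replaces the two closed-form (i*(i-1))//2 / (...)//6 loops by a single forward pass
-- maintaining C(i,2) and C(i,3) with Pascal-style additive recurrences (alternative, same cost).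

-- ===== PORT A =====
def precompute_combinations (max_count : Int) : List Int × List Int :=
  let comb2 := List.replicate (max_count + 1).toNat (0 : Int)
  let comb3 := List.replicate (max_count + 1).toNat (0 : Int)
  let comb2 := (PySem.List.pyRange 2 (max_count + 1) 1).foldl
    (fun acc i => acc.set i.toNat (PySem.Int.floordiv (i * (i - 1)) 2)) comb2
  let comb3 := (PySem.List.pyRange 3 (max_count + 1) 1).foldl
    (fun acc i => acc.set i.toNat (PySem.Int.floordiv (i * (i - 1) * (i - 2)) 6)) comb3
  (comb2, comb3)

-- ===== PORT B =====
def precompute_combinations_alt (max_count : Int) : List Int × List Int :=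
  let st := (PySem.List.pyRange 0 (max_count + 1) 1).foldl
    (fun st i =>
      match st with
      | (comb2, comb3, c2, c3) => (comb2 ++ [c2], comb3 ++ [c3], c2 + i, c3 + c2))
    (([] : List Int), ([] : List Int), (0 : Int), (0 : Int))
  (st.1, st.2.1)

-- ===== PRECONDITION & SPEC =====
def Spec_precompute_combinations (max_count : Int) (out : List Int × List Int) : Prop := out = precompute_combinations_alt max_count
instance (max_count : Int) (out : List Int × List Int) : Decidable (Spec_precompute_combinations max_count out) := by unfold Spec_precompute_combinations; infer_instance

-- ===== CLAIM (what is proved, stated in full; the proofs are below) =====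
def Claim_equal_precompute_combinations : Prop := ∀ (max_count : Int), Dom_precompute_combinations max_count → Spec_precompute_combinations max_count (precompute_combinations max_count)

-- ===== LEMMAS AND PROOFS =====

def fA (i : Int) : Int := PySem.Int.floordiv (i * (i - 1)) 2
def gA (i : Int) : Int := PySem.Int.floordiv (i * (i - 1) * (i - 2)) 6

theorem fA_succ (i : Int) : fA (i + 1) = fA i + i := by
  unfold fA
  rw [PySem.Int.floordiv_eq_ediv_of_pos (by norm_num),
      PySem.Int.floordiv_eq_ediv_of_pos (by norm_num)]
  have h : (i + 1) * (i + 1 - 1) = i * (i - 1) + i * 2 := by ring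
  rw [h, Int.add_mul_ediv_right _ _ (by norm_num)]

theorem fA_even (i : Int) : ∃ k, i * (i - 1) = 2 * k ∧ fA i = k := by
  obtain ⟨k, hk⟩ := Int.even_mul_succ_self (i - 1)
  have h : i * (i - 1) = 2 * k := by
    have : (i - 1) * (i - 1 + 1) = k + k := hk
    nlinarith [this]
  refine ⟨k, h, ?_⟩
  unfold fA
  rw [PySem.Int.floordiv_eq_ediv_of_pos (by norm_num), h,
      Int.mul_ediv_cancel_left _ (by norm_num)]

theorem gA_succ (i : Int) : gA (i + 1) = gA i + fA i := by
  obtain ⟨k, hk, hf⟩ := fA_even i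
  unfold gA
  rw [PySem.Int.floordiv_eq_ediv_of_pos (by norm_num),
      PySem.Int.floordiv_eq_ediv_of_pos (by norm_num)]
  have h : (i + 1) * (i + 1 - 1) * (i + 1 - 2) = i * (i - 1) * (i - 2) + k * 6 := by
    nlinarith [hk]
  rw [h, Int.add_mul_ediv_right _ _ (by norm_num), hf]

-- characterization of an index-assignment loop over range(a, M)
theorem loopA (f : Int → Int) :
    ∀ (n : Nat) (a M : Int), 0 ≤ a → n = (M - a).toNat →
    (PySem.List.pyRange a M 1).foldl (fun acc i => acc.set i.toNat (f i))
      ((List.range M.toNat).map (fun (j : Nat) => if (j : Int) < a then f (j : Int) else 0))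
    = (List.range M.toNat).map (fun (j : Nat) => if (j : Int) < M then f (j : Int) else 0) := by
  intro n
  induction n with
  | zero =>
    intro a M ha hn
    have hMa : M ≤ a := by omega
    rw [PySem.List.pyRange_one_eq_nil hMa]
    simp only [List.foldl_nil]
    apply List.map_congr_left
    intro j hj
    simp only [List.mem_range] at hj
    have h1 : (j : Int) < M := by omega
    rw [if_pos h1, if_pos (by omega)]
  | succ n ih =>
    intro a M ha hn
    have haM : a < M := by omega
    rw [PySem.List.pyRange_one_cons haM]
    simp only [List.foldl_cons]
    have hset : ((List.range M.toNat).map (fun (j : Nat) => if (j : Int) < a then f (j : Int) else 0)).set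
        a.toNat (f a)
        = (List.range M.toNat).map (fun (j : Nat) => if (j : Int) < a + 1 then f (j : Int) else 0) := by
      apply List.ext_getElem
      · simp
      · intro j h1 h2
        simp only [List.length_set, List.length_map, List.length_range] at h1
        rw [List.getElem_set]
        simp only [List.getElem_map, List.getElem_range]
        by_cases hj : a.toNat = j
        · rw [if_pos hj, if_pos (by omega)]
          congr 1
          omega
        · rw [if_neg hj]
          have hja : (j : Int) ≠ a := by omega
          by_cases h : (j : Int) < a
          · rw [if_pos h, if_pos (by omega)]
          · rw [if_neg h, if_neg (by omega)]
    rw [hset]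
    exact ih (a + 1) M (by omega) (by omega)

-- characterization of B's single accumulating pass
theorem loopB :
    ∀ (n : Nat) (a M : Int), 0 ≤ a → a ≤ max M 0 → n = (M - a).toNat →
    (PySem.List.pyRange a M 1).foldl
      (fun st i =>
        match st with
        | (comb2, comb3, c2, c3) => (comb2 ++ [c2], comb3 ++ [c3], c2 + i, c3 + c2))
      ((List.range a.toNat).map (fun (j : Nat) => fA (j : Int)), (List.range a.toNat).map (fun (j : Nat) => gA (j : Int)),
        fA a, gA a)
    = ((List.range M.toNat).map (fun (j : Nat) => fA (j : Int)), (List.range M.toNat).map (fun (j : Nat) => gA (j : Int)),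
        fA (max M a), gA (max M a)) := by
  intro n
  induction n with
  | zero =>
    intro a M ha hmax hn
    have hMa : M ≤ a := by omega
    have hEq : a.toNat = M.toNat := by omega
    rw [PySem.List.pyRange_one_eq_nil hMa]
    simp only [List.foldl_nil, hEq, max_eq_right hMa]
  | succ n ih =>
    intro a M ha hmax hn
    have haM : a < M := by omega
    rw [PySem.List.pyRange_one_cons haM]
    simp only [List.foldl_cons]
    have h2 : (List.range a.toNat).map (fun (j : Nat) => fA (j : Int)) ++ [fA a]
        = (List.range (a + 1).toNat).map (fun (j : Nat) => fA (j : Int)) := by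
      have h : (a + 1).toNat = a.toNat + 1 := by omega
      rw [h, List.range_succ, List.map_append, List.map_cons, List.map_nil,
          Int.toNat_of_nonneg ha]
    have h3 : (List.range a.toNat).map (fun (j : Nat) => gA (j : Int)) ++ [gA a]
        = (List.range (a + 1).toNat).map (fun (j : Nat) => gA (j : Int)) := by
      have h : (a + 1).toNat = a.toNat + 1 := by omega
      rw [h, List.range_succ, List.map_append, List.map_cons, List.map_nil,
          Int.toNat_of_nonneg ha]
    have h4 : fA a + a = fA (a + 1) := (fA_succ a).symm
    have h5 : gA a + fA a = gA (a + 1) := (gA_succ a).symm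
    rw [h2, h3, h4, h5, ih (a + 1) M (by omega) (by omega) (by omega)]
    have h6 : max M (a + 1) = max M a := by omega
    rw [h6]

theorem init_map (c : Int) (f : Int → Int) (hf : ∀ j : Int, 0 ≤ j → j < c → f j = 0)
    (n : Nat) :
    List.replicate n (0 : Int) = (List.range n).map (fun (j : Nat) => if (j : Int) < c then f (j : Int) else 0) := by
  apply List.ext_getElem
  · simp
  · intro j h1 h2
    simp only [List.getElem_replicate, List.getElem_map, List.getElem_range]
    by_cases h : (j : Int) < c
    · rw [if_pos h, hf _ (by omega) h]
    · rw [if_neg h]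

-- ===== VERDICT (by name: the statement is the Claim_ definition above) =====
theorem precompute_combinations_spec : Claim_equal_precompute_combinations := by
  unfold Claim_equal_precompute_combinations
  intro m _
  unfold Spec_precompute_combinations precompute_combinations precompute_combinations_alt
  have hA2 : (PySem.List.pyRange 2 (m + 1) 1).foldl
      (fun acc i => acc.set i.toNat (PySem.Int.floordiv (i * (i - 1)) 2))
      (List.replicate (m + 1).toNat (0 : Int))
      = (List.range (m + 1).toNat).map (fun (j : Nat) => fA (j : Int)) := by
    rw [init_map 2 fA (by intro j h1 h2; interval_cases j <;> decide)]
    have := loopA fA ((m + 1) - 2).toNat 2 (m + 1) (by norm_num) rfl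
    simp only [fA] at this ⊢
    rw [this]
    apply List.map_congr_left
    intro j hj
    simp only [List.mem_range] at hj
    rw [if_pos (by omega)]
  have hA3 : (PySem.List.pyRange 3 (m + 1) 1).foldl
      (fun acc i => acc.set i.toNat (PySem.Int.floordiv (i * (i - 1) * (i - 2)) 6))
      (List.replicate (m + 1).toNat (0 : Int))
      = (List.range (m + 1).toNat).map (fun (j : Nat) => gA (j : Int)) := by
    rw [init_map 3 gA (by intro j h1 h2; interval_cases j <;> decide)]
    have := loopA gA ((m + 1) - 3).toNat 3 (m + 1) (by norm_num) rfl
    simp only [gA] at this ⊢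
    rw [this]
    apply List.map_congr_left
    intro j hj
    simp only [List.mem_range] at hj
    rw [if_pos (by omega)]
  have hB : (PySem.List.pyRange 0 (m + 1) 1).foldl
      (fun st i =>
        match st with
        | (comb2, comb3, c2, c3) => (comb2 ++ [c2], comb3 ++ [c3], c2 + i, c3 + c2))
      (([] : List Int), ([] : List Int), (0 : Int), (0 : Int))
      = ((List.range (m + 1).toNat).map (fun (j : Nat) => fA (j : Int)),
         (List.range (m + 1).toNat).map (fun (j : Nat) => gA (j : Int)),
         fA (max (m + 1) 0), gA (max (m + 1) 0)) := by
    have h0 : (([] : List Int), ([] : List Int), (0 : Int), (0 : Int))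
        = ((List.range (0 : Int).toNat).map (fun (j : Nat) => fA (j : Int)),
           (List.range (0 : Int).toNat).map (fun (j : Nat) => gA (j : Int)), fA 0, gA 0) := by decide
    rw [h0, loopB ((m + 1) - 0).toNat 0 (m + 1) le_rfl (by omega) rfl]
  simp only [hA2, hA3, hB]
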